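-- pv_equiv track=rewrite | github.com/SDM-TIB/MaxThesis | src/RuleMining/Util.py | derivable
-- ===== SOURCE A (Python) =====
-- def derivable(literal_type, t, hierarchy):
--     if literal_type == t:
--         return True
--
--     if t in hierarchy:
--         for st in hierarchy[t]:
--             if derivable(literal_type, st, hierarchy):
--                 return True
--
--     return False
-- ===== SOURCE B (Python) =====
-- def derivable(literal_type, t, hierarchy):
--     # Iterative reachability: grow the set of types reachable from t level by
--     # level.  A shortest derivation path uses each hierarchy key at most once,
--     # so len(hierarchy) expansion rounds are always enough.
--     reach = {t}
--     for _ in range(len(hierarchy)):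
--         reach = reach | {c for x in reach for c in hierarchy.get(x, [])}
--     return literal_type in reach
-- ===== Notes on version B (the rewrite author's own statement) =====
-- stated objective: alternative
-- what changed: A searches recursively path by path; B instead computes the whole reachable set iteratively (one expansion round per hierarchy key) and tests membership once.
-- outside the precondition, e.g. on derivable('a', 't', {'t': ['a', 'c'], 'c': ['c']}): A returns True, B returns True; on derivable('z', 't', {'t': ['c'], 'c': ['c']}): A raises RecursionError, B returns False
import Mathlib
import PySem

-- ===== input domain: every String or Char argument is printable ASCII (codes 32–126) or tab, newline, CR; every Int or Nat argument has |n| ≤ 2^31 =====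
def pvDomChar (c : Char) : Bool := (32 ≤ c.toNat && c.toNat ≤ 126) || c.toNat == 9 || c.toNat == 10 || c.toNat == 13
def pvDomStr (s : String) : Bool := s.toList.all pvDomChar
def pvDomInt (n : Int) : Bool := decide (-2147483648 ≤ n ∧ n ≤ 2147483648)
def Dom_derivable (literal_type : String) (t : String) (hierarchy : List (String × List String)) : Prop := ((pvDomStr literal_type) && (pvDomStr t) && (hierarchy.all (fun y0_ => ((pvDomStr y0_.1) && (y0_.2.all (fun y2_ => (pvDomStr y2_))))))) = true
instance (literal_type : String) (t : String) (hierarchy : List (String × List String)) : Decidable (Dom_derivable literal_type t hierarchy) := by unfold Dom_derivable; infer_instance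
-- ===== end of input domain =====

-- B replaces A's recursive path-by-path search by an iterative computation of the whole
-- reachable set, one expansion round per hierarchy key, then a single membership test.

-- ===== PORT A =====
-- dict lookup on the association list: first matching key (hierarchy[t]); [] only when absent
def pvChildrenA (hierarchy : List (String × List String)) (t : String) : List String :=
  ((hierarchy.find? (fun p => p.1 == t)).map (·.2)).getD []

-- A's recursion, made total with fuel; fuel hierarchy.length + 1 is enough for every input
-- admitted by Pre_derivable (a shortest derivation path passes through distinct keys)
def pvDerivFuel (hierarchy : List (String × List String)) : Nat → String → String → Bool
  | 0, _, _ => false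
  | n + 1, literal_type, t =>
    if literal_type == t then true
    else if hierarchy.any (fun p => p.1 == t) then
      (pvChildrenA hierarchy t).any (fun st => pvDerivFuel hierarchy n literal_type st)
    else false

def derivable (literal_type : String) (t : String) (hierarchy : List (String × List String)) : Bool :=
  pvDerivFuel hierarchy (hierarchy.length + 1) literal_type t

-- ===== PORT B =====
-- reach | {c for x in reach for c in hierarchy.get(x, [])}   (hierarchy.get(x, []) is the
-- same dict lookup as in port A: pvChildrenA)
def pvStepB (hierarchy : List (String × List String)) (reach : PySem.Set String) : PySem.Set String :=
  PySem.Set.union reach (PySem.Set.ofList (reach.flatMap (pvChildrenA hierarchy)))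

def derivable_alt (literal_type : String) (t : String) (hierarchy : List (String × List String)) : Bool :=
  PySem.Set.contains
    ((PySem.List.pyRange 0 hierarchy.length 1).foldl (fun r _ => pvStepB hierarchy r)
      (PySem.Set.ofList [t]))
    literal_type

-- ===== PRECONDITION & SPEC =====
-- Bounded path predicate of the hierarchy graph PRUNED AT literal_type (A returns True at
-- literal_type without expanding its children, so literal_type is a sink of the explored
-- graph): edge x → c for c ∈ pvChildrenA x, x ≠ lt.  With fuel hierarchy.length + 1 it is
-- full pruned reachability (a shortest path passes through pairwise distinct keys).
def pvReachesP (hierarchy : List (String × List String)) (lt : String) : Nat → String → String → Bool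
  | 0, _, _ => false
  | n + 1, a, b =>
    a == b || (!(a == lt) && (pvChildrenA hierarchy a).any (fun c => pvReachesP hierarchy lt n c b))

-- Python A recurses without a visited set, so it hits the recursion limit (RecursionError)
-- whenever its depth-first search enters a cycle; Pre_ excludes exactly the hierarchies in
-- which a cycle not passing through literal_type is reachable from t without passing through
-- literal_type — outside that condition A is guaranteed to return.  Inside it A raises
-- unless its particular left-to-right child order happens to meet literal_type before the
-- cycle; that remaining returning corner depends on replaying A's search order and cannot be
-- stated as a closed-form input condition (example in the claim's cites).
def Pre_derivable (literal_type : String) (t : String) (hierarchy : List (String × List String)) : Prop :=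
  ∀ p ∈ hierarchy, p.1 ≠ literal_type →
    pvReachesP hierarchy literal_type (hierarchy.length + 1) t p.1 = true →
    ∀ c ∈ pvChildrenA hierarchy p.1,
      pvReachesP hierarchy literal_type (hierarchy.length + 1) c p.1 = false

instance (literal_type : String) (t : String) (hierarchy : List (String × List String)) : Decidable (Pre_derivable literal_type t hierarchy) := by
  unfold Pre_derivable; infer_instance

def pvWitness_derivable : String × String × (List (String × List String)) :=
  ("A", "C", [("C", ["B"]), ("B", ["A"])])

def Spec_derivable (literal_type : String) (t : String) (hierarchy : List (String × List String)) (out : Bool) : Prop := out = derivable_alt literal_type t hierarchy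
instance (literal_type : String) (t : String) (hierarchy : List (String × List String)) (out : Bool) : Decidable (Spec_derivable literal_type t hierarchy out) := by unfold Spec_derivable; infer_instance

-- ===== CLAIM (what is proved, stated in full; the proofs are below) =====
def Claim_equal_derivable : Prop := ∀ (literal_type : String) (t : String) (hierarchy : List (String × List String)), Dom_derivable literal_type t hierarchy → Pre_derivable literal_type t hierarchy → Spec_derivable literal_type t hierarchy (derivable literal_type t hierarchy)

-- ===== LEMMAS AND PROOFS =====

-- unpruned bounded reachability, the value port A's fueled recursion computes
def pvReachesIn (hierarchy : List (String × List String)) : Nat → String → String → Bool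
  | 0, _, _ => false
  | n + 1, a, b => a == b || (pvChildrenA hierarchy a).any (fun c => pvReachesIn hierarchy n c b)

-- the `t in hierarchy` guard is redundant: when t is not a key the children list is empty
theorem pvChildrenA_of_not_key (h : List (String × List String)) (t : String)
    (hk : h.any (fun p => p.1 == t) = false) : pvChildrenA h t = [] := by
  unfold pvChildrenA
  have : h.find? (fun p => p.1 == t) = none := by
    apply List.find?_eq_none.mpr
    intro p hp
    exact List.any_eq_false.mp hk p hp
  simp [this]

-- A's fueled recursion is bounded reachability (arguments swapped, guard removed)
theorem pvDerivFuel_eq_reachesIn (h : List (String × List String)) (n : Nat)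
    (lt t : String) : pvDerivFuel h n lt t = pvReachesIn h n t lt := by
  induction n generalizing t with
  | zero => rfl
  | succ n ih =>
    unfold pvDerivFuel pvReachesIn
    by_cases hlt : lt = t
    · subst hlt; simp
    · have h1 : (lt == t) = false := by simp [hlt]
      have h2 : (t == lt) = false := by simp [Ne.symm hlt]
      rw [h1, h2]
      simp only [Bool.false_eq_true, if_false, Bool.false_or]
      by_cases hg : h.any (fun p => p.1 == t) = true
      · simp [hg, ih]
      · have hk := pvChildrenA_of_not_key h t (Bool.eq_false_iff.mpr hg)
        simp [hg, hk]

-- reflexivity and monotonicity of bounded reachability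
theorem pvReachesIn_refl (h : List (String × List String)) (n : Nat) (a : String) :
    pvReachesIn h (n + 1) a a = true := by
  unfold pvReachesIn; simp

theorem pvReachesIn_mono (h : List (String × List String)) (n : Nat) (a b : String)
    (hr : pvReachesIn h n a b = true) : pvReachesIn h (n + 1) a b = true := by
  induction n generalizing a with
  | zero => simp [pvReachesIn] at hr
  | succ n ih =>
    unfold pvReachesIn at hr ⊢
    rcases Bool.or_eq_true_iff.mp hr with hab | hany
    · simp [hab]
    · rcases List.any_eq_true.mp hany with ⟨c, hc, hrc⟩
      exact Bool.or_eq_true_iff.mpr (Or.inr (List.any_eq_true.mpr ⟨c, hc, ih c hrc⟩))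

-- peel one step off the BACK of a path
theorem pvReachesIn_snoc (h : List (String × List String)) (n : Nat) (a b : String) :
    pvReachesIn h (n + 1) a b = true ↔
      a = b ∨ ∃ y, pvReachesIn h n a y = true ∧ b ∈ pvChildrenA h y := by
  induction n generalizing a with
  | zero =>
    unfold pvReachesIn
    simp [pvReachesIn, beq_iff_eq]
  | succ n ih =>
    constructor
    · intro hr
      unfold pvReachesIn at hr
      rcases Bool.or_eq_true_iff.mp hr with hab | hany
      · exact Or.inl (by simpa using hab)
      · rcases List.any_eq_true.mp hany with ⟨c, hc, hrc⟩
        rcases (ih c).mp hrc with hcb | ⟨y, hy, hby⟩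
        · subst hcb
          exact Or.inr ⟨a, pvReachesIn_refl h n a, hc⟩
        · refine Or.inr ⟨y, ?_, hby⟩
          unfold pvReachesIn
          exact Bool.or_eq_true_iff.mpr (Or.inr (List.any_eq_true.mpr ⟨c, hc, hy⟩))
    · intro hr
      rcases hr with hab | ⟨y, hy, hby⟩
      · subst hab; exact pvReachesIn_refl h (n + 1) a
      · unfold pvReachesIn at hy ⊢
        rcases Bool.or_eq_true_iff.mp hy with hay | hany
        · have : a = y := by simpa using hay
          subst this
          exact Bool.or_eq_true_iff.mpr
            (Or.inr (List.any_eq_true.mpr ⟨b, hby, pvReachesIn_refl h n b⟩))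
        · rcases List.any_eq_true.mp hany with ⟨c, hc, hcy⟩
          have : pvReachesIn h (n + 1) c b = true :=
            (ih c).mpr (Or.inr ⟨y, hcy, hby⟩)
          exact Bool.or_eq_true_iff.mpr (Or.inr (List.any_eq_true.mpr ⟨c, hc, this⟩))

-- B's iterated expansion, written as plain iteration
def pvIterB (h : List (String × List String)) (t : String) : Nat → PySem.Set String
  | 0 => PySem.Set.ofList [t]
  | k + 1 => pvStepB h (pvIterB h t k)

-- the foldl over range(len(hierarchy)) ignores the loop variable: it is k-fold iteration
theorem pvFoldl_const (h : List (String × List String)) (l : List Int)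
    (r : PySem.Set String) :
    l.foldl (fun r _ => pvStepB h r) r = (pvStepB h)^[l.length] r := by
  induction l generalizing r with
  | nil => rfl
  | cons x xs ih => simp [List.foldl_cons, ih, Function.iterate_succ_apply]

-- membership in the k-th expansion round is bounded reachability with fuel k+1
theorem pvMem_iterB (h : List (String × List String)) (t : String) (k : Nat) (x : String) :
    x ∈ pvIterB h t k ↔ pvReachesIn h (k + 1) t x = true := by
  induction k generalizing x with
  | zero =>
    rw [show pvIterB h t 0 = PySem.Set.ofList [t] from rfl, PySem.Set.mem_ofList]
    constructor
    · intro hx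
      have hxt : x = t := by simpa using hx
      subst hxt
      exact pvReachesIn_refl h 0 x
    · intro hx
      unfold pvReachesIn at hx
      rcases Bool.or_eq_true_iff.mp hx with htx | hany
      · have : t = x := by simpa using htx
        simp [this]
      · rcases List.any_eq_true.mp hany with ⟨c, _, hc⟩
        simp [pvReachesIn] at hc
  | succ k ih =>
    unfold pvIterB pvStepB
    rw [PySem.Set.mem_union]
    constructor
    · intro hx
      rcases hx with hx | hx
      · exact pvReachesIn_mono h (k + 1) t x ((ih x).mp hx)
      · rw [PySem.Set.mem_ofList, List.mem_flatMap] at hx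
        rcases hx with ⟨y, hy, hxy⟩
        exact (pvReachesIn_snoc h (k + 1) t x).mpr
          (Or.inr ⟨y, (ih y).mp hy, hxy⟩)
    · intro hx
      rcases (pvReachesIn_snoc h (k + 1) t x).mp hx with htx | ⟨y, hy, hxy⟩
      · subst htx
        exact Or.inl ((ih t).mpr (pvReachesIn_refl h k t))
      · right
        rw [PySem.Set.mem_ofList, List.mem_flatMap]
        exact ⟨y, (ih y).mpr hy, hxy⟩

-- the two ports agree (on every input; Pre_ is needed only for the Python original)
theorem pv_ports_agree (literal_type t : String) (h : List (String × List String)) :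
    derivable literal_type t h = derivable_alt literal_type t h := by
  unfold derivable derivable_alt
  rw [pvFoldl_const, PySem.List.length_pyRange_one]
  simp only [Int.sub_zero, Int.toNat_natCast]
  have hiter : (pvStepB h)^[h.length] (PySem.Set.ofList [t]) = pvIterB h t h.length := by
    induction h.length with
    | zero => rfl
    | succ n ih => rw [Function.iterate_succ_apply', ih]; rfl
  rw [hiter, pvDerivFuel_eq_reachesIn]
  by_cases hm : literal_type ∈ pvIterB h t h.length
  · rw [(pvMem_iterB h t h.length literal_type).mp hm]
    exact ((PySem.Set.contains_iff _ _).mpr hm).symm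
  · have h1 : pvReachesIn h (h.length + 1) t literal_type = false := by
      rw [Bool.eq_false_iff]
      intro hr
      exact hm ((pvMem_iterB h t h.length literal_type).mpr hr)
    have h2 : PySem.Set.contains (pvIterB h t h.length) literal_type = false := by
      rw [Bool.eq_false_iff]
      intro hcc
      exact hm ((PySem.Set.contains_iff _ _).mp hcc)
    rw [h1, h2]

-- ===== VERDICT (by name: the statement is the Claim_ definition above) =====
theorem derivable_spec : Claim_equal_derivable := by
  intro literal_type t hierarchy _ _
  unfold Spec_derivable
  exact pv_ports_agree literal_type t hierarchy
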